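-- pv_equiv track=rewrite | github.com/cesar34-lab/parcial | parcial_1/punto_2/expre_regular.py | correr_afd
-- ===== SOURCE A (Python) =====
-- def clasificar(ch):
--     if ch.isalpha():
--         return 'LETRA'
--     if ch.isdigit():
--         return 'DIGITO'
--     return 'OTRO'
--
-- transiciones = {
--     ('q0', 'LETRA'):  'q1',
--     ('q0', 'DIGITO'): 'qE',
--     ('q0', 'OTRO'):   'qE',
--
--     ('q1', 'LETRA'):  'q1',
--     ('q1', 'DIGITO'): 'q1',
--     ('q1', 'OTRO'):   'qE',
--
--     ('qE', 'LETRA'):  'qE',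
--     ('qE', 'DIGITO'): 'qE',
--     ('qE', 'OTRO'):   'qE',
-- }
--
-- def correr_afd(token):
--     estado = 'q0'
--
--     if not token:
--         return False
--
--     for ch in token:
--         clase = clasificar(ch)
--         estado = transiciones[(estado, clase)]
--         if estado == 'qE':
--             break
--
--     return estado == 'q1'
-- ===== SOURCE B (Python) =====
-- def correr_afd(token):
--     if not token:
--         return False
--     return token[0].isalpha() and all(c.isalpha() or c.isdigit() for c in token[1:])
-- ===== Notes on version B (the rewrite author's own statement) =====
-- stated objective: simpler
-- what changed: Replaced the DFA simulation (classifier + transition table + state loop with break) by a direct boolean predicate: first char isalpha and every remaining char isalpha or isdigit; no per-character dict lookup or state bookkeeping.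
import Mathlib
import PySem

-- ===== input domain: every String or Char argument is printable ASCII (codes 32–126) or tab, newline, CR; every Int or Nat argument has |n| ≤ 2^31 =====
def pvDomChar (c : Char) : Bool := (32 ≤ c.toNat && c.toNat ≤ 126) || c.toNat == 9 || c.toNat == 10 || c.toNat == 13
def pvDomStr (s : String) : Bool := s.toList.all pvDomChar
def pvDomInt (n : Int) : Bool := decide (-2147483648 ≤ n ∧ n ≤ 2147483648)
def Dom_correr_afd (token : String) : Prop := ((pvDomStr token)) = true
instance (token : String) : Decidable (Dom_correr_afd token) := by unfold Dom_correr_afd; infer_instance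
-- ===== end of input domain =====

-- B replaces the DFA simulation by a direct boolean predicate (simpler, same cost).

-- ===== PORT A =====
def clasificar (ch : Char) : String :=
  if PySem.Chars.isalpha ch then "LETRA"
  else if PySem.Chars.isdigit ch then "DIGITO"
  else "OTRO"

def transiciones : PySem.Dict (String × String) String :=
  (((((((((PySem.Dict.empty.insert ("q0", "LETRA") "q1").insert ("q0", "DIGITO") "qE").insert
    ("q0", "OTRO") "qE").insert ("q1", "LETRA") "q1").insert ("q1", "DIGITO") "q1").insert
    ("q1", "OTRO") "qE").insert ("qE", "LETRA") "qE").insert ("qE", "DIGITO") "qE").insert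
    ("qE", "OTRO") "qE")

-- the for-loop with break (KeyError cannot occur: every reachable (estado, clase) is in the table,
-- so the getD default "" is never used)
def correrLoop (estado : String) : List Char → String
  | [] => estado
  | ch :: rest =>
      let clase := clasificar ch
      let estado' := transiciones.getD (estado, clase) ""
      if estado' == "qE" then estado' else correrLoop estado' rest

def correr_afd (token : String) : Bool :=
  if token.toList.isEmpty then false
  else (correrLoop "q0" token.toList) == "q1"

-- ===== PORT B =====
def correr_afd_alt (token : String) : Bool :=
  match token.toList with
  | [] => false
  | c :: rest => PySem.Chars.isalpha c && rest.all (fun ch => PySem.Chars.isalpha ch || PySem.Chars.isdigit ch)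

-- ===== PRECONDITION & SPEC =====
def Spec_correr_afd (token : String) (out : Bool) : Prop := out = correr_afd_alt token
instance (token : String) (out : Bool) : Decidable (Spec_correr_afd token out) := by unfold Spec_correr_afd; infer_instance

-- ===== CLAIM (what is proved, stated in full; the proofs are below) =====
def Claim_equal_correr_afd : Prop := ∀ (token : String), Dom_correr_afd token → Spec_correr_afd token (correr_afd token)

-- ===== LEMMAS AND PROOFS =====

lemma trans_q0L : transiciones.getD ("q0", "LETRA") "" = "q1" := by decide
lemma trans_q0D : transiciones.getD ("q0", "DIGITO") "" = "qE" := by decide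
lemma trans_q0O : transiciones.getD ("q0", "OTRO") "" = "qE" := by decide
lemma trans_q1L : transiciones.getD ("q1", "LETRA") "" = "q1" := by decide
lemma trans_q1D : transiciones.getD ("q1", "DIGITO") "" = "q1" := by decide
lemma trans_q1O : transiciones.getD ("q1", "OTRO") "" = "qE" := by decide

lemma correrLoop_q1 (l : List Char) :
    correrLoop "q1" l = (if l.all (fun ch => PySem.Chars.isalpha ch || PySem.Chars.isdigit ch) then "q1" else "qE") := by
  induction l with
  | nil => simp [correrLoop]
  | cons ch rest ih =>
      by_cases ha : PySem.Chars.isalpha ch = true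
      · simp [correrLoop, clasificar, ha, trans_q1L, trans_q1D, ih]
      · by_cases hd : PySem.Chars.isdigit ch = true
        · simp [correrLoop, clasificar, ha, hd, trans_q1L, trans_q1D, ih]
        · simp [correrLoop, clasificar, ha, hd, trans_q1O]

-- ===== VERDICT (by name: the statement is the Claim_ definition above) =====
theorem correr_afd_spec : Claim_equal_correr_afd := by
  intro token _
  unfold Spec_correr_afd correr_afd correr_afd_alt
  cases h : token.toList with
  | nil => simp
  | cons c rest =>
      simp only [List.isEmpty_cons]
      by_cases ha : PySem.Chars.isalpha c = true
      · have hstep : correrLoop "q0" (c :: rest) = correrLoop "q1" rest := by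
          simp [correrLoop, clasificar, ha, trans_q0L]
        rw [hstep, correrLoop_q1]
        cases hall : rest.all (fun ch => PySem.Chars.isalpha ch || PySem.Chars.isdigit ch) <;>
          simp [hall, ha]
      · by_cases hd : PySem.Chars.isdigit c = true
        · simp [correrLoop, clasificar, ha, hd, trans_q0D]
        · simp [correrLoop, clasificar, ha, hd, trans_q0O]
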